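-- pv_equiv track=rewrite | github.com/azpiero/pptx-replacer | get_images_2.py | is_likely_filename
-- ===== SOURCE A (Python) =====
-- IMAGE_EXTENSIONS = ['.png', '.jpg', '.jpeg', '.gif', '.bmp', '.tiff', '.tif',
--                     '.wmf', '.emf', '.svg', '.wdp']
--
-- def is_likely_filename(name: str) -> bool:
--     """文字列がファイル名っぽいかどうかを判定"""
--     if not name:
--         return False
--     name_lower = name.lower()
--     for ext in IMAGE_EXTENSIONS:
--         if name_lower.endswith(ext):
--             return True
--     return False
-- ===== SOURCE B (Python) =====
-- IMAGE_EXTENSIONS = ['.png', '.jpg', '.jpeg', '.gif', '.bmp', '.tiff', '.tif',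
--                     '.wmf', '.emf', '.svg', '.wdp']
-- _EXT_SET = set(IMAGE_EXTENSIONS)
--
-- def is_likely_filename(name: str) -> bool:
--     # single forward pass: maintain the suffix starting at the last '.' seen so far
--     ext = None
--     for ch in name.lower():
--         if ch == '.':
--             ext = '.'
--         elif ext is not None:
--             ext += ch
--     return ext in _EXT_SET
-- ===== Notes on version B (the rewrite author's own statement) =====
-- stated objective: alternative
-- what changed: Replaces the scan over the 11-extension list with endswith per element by a single forward pass over the lowercased name that maintains the suffix starting at the last dot seen, followed by one set-membership test of that extension.
import Mathlib
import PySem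

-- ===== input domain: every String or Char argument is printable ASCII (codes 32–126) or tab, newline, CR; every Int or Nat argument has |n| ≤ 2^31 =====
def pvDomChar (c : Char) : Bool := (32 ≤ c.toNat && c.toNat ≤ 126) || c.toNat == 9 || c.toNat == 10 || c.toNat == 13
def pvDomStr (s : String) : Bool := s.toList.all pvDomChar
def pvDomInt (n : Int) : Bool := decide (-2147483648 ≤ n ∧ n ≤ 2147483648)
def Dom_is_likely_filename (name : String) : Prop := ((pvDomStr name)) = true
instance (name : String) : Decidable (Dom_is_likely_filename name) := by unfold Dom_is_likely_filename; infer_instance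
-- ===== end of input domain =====

-- B replaces A's scan of the extension list with one forward pass that keeps the
-- suffix starting at the last '.' and a single set-membership test (objective: alternative).

-- ===== PORT A =====
def IMAGE_EXTENSIONS : List String :=
  [".png", ".jpg", ".jpeg", ".gif", ".bmp", ".tiff", ".tif", ".wmf", ".emf", ".svg", ".wdp"]

-- the 'for ext in IMAGE_EXTENSIONS' loop with early return
def extLoop (nameLower : String) : List String → Bool
  | [] => false
  | e :: es => if PySem.Str.endswith nameLower e then true else extLoop nameLower es

def is_likely_filename (name : String) : Bool :=
  if name = "" then false
  else extLoop (PySem.Str.lower name) IMAGE_EXTENSIONS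

-- ===== PORT B =====
-- the loop body of Source B: on '.', restart the extension; otherwise extend it if started
def extAccum (ext : Option (List Char)) (c : Char) : Option (List Char) :=
  if c = '.' then some ['.']
  else match ext with
       | none => none
       | some e => some (e ++ [c])

-- _EXT_SET: the fixed set of image extensions (distinct elements)
def EXT_SET : List (List Char) :=
  [".png".toList, ".jpg".toList, ".jpeg".toList, ".gif".toList, ".bmp".toList,
   ".tiff".toList, ".tif".toList, ".wmf".toList, ".emf".toList, ".svg".toList, ".wdp".toList]

def is_likely_filename_alt (name : String) : Bool :=
  match (PySem.Chars.lower name.toList).foldl extAccum none with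
  | some e => EXT_SET.contains e     -- 'ext in _EXT_SET' when ext is a string
  | none => false                    -- 'ext in _EXT_SET' when ext is None

-- ===== PRECONDITION & SPEC =====
def Spec_is_likely_filename (name : String) (out : Bool) : Prop := out = is_likely_filename_alt name
instance (name : String) (out : Bool) : Decidable (Spec_is_likely_filename name out) := by unfold Spec_is_likely_filename; infer_instance

-- ===== CLAIM (what is proved, stated in full; the proofs are below) =====
def Claim_equal_is_likely_filename : Prop := ∀ (name : String), Dom_is_likely_filename name → Spec_is_likely_filename name (is_likely_filename name)

-- ===== LEMMAS AND PROOFS =====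

-- the suffix of ls starting at its last '.'
def lastDotSuffix (ls : List Char) : List Char :=
  '.' :: (ls.reverse.takeWhile (· ≠ '.')).reverse

-- characterisation of B's fold
theorem foldl_extAccum (ls : List Char) :
    ls.foldl extAccum none = if '.' ∈ ls then some (lastDotSuffix ls) else none := by
  induction ls using List.reverseRecOn with
  | nil => simp
  | append_singleton ys c ih =>
    by_cases hc : c = '.'
    · subst hc
      simp [List.foldl_append, ih, extAccum, lastDotSuffix]
    · have hcm : ('.' : Char) ≠ c := Ne.symm hc
      simp only [List.foldl_append, List.foldl_cons, List.foldl_nil, ih]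
      by_cases hmem : '.' ∈ ys
      · simp [hmem, hc, extAccum, lastDotSuffix, Ne.symm hc]
      · simp [hmem, hc, extAccum, hcm]

theorem lastDotSuffix_append_ne (ys : List Char) (c : Char) (hc : c ≠ '.') :
    lastDotSuffix (ys ++ [c]) = lastDotSuffix ys ++ [c] := by
  simp [lastDotSuffix, hc]

theorem lds_suffix (ls : List Char) (hmem : '.' ∈ ls) : lastDotSuffix ls <:+ ls := by
  induction ls using List.reverseRecOn with
  | nil => simp at hmem
  | append_singleton ys c ih =>
    by_cases hc : c = '.'
    · subst hc
      refine ⟨ys, ?_⟩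
      simp [lastDotSuffix]
    · have hys : '.' ∈ ys := by
        rcases List.mem_append.mp hmem with h | h
        · exact h
        · simp at h; exact absurd h.symm hc
      obtain ⟨p, hp⟩ := ih hys
      exact ⟨p, by rw [lastDotSuffix_append_ne ys c hc, ← List.append_assoc, hp]⟩

theorem suffix_iff (ls r : List Char) (h : '.' ∉ r) :
    ('.' :: r) <:+ ls ↔ ('.' ∈ ls ∧ lastDotSuffix ls = '.' :: r) := by
  constructor
  · rintro ⟨p, rfl⟩
    constructor
    · simp
    · unfold lastDotSuffix
      have hrev : (p ++ '.' :: r).reverse = r.reverse ++ '.' :: p.reverse := by simp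
      rw [hrev, List.takeWhile_append_of_pos (by intro a ha; simp; rintro rfl; exact h (by simpa using ha))]
      simp
  · rintro ⟨hmem, heq⟩
    rw [← heq]
    exact lds_suffix ls hmem

theorem ends_iff (ls r : List Char) (h : '.' ∉ r) :
    PySem.Chars.endswith ls ('.' :: r) = (ls.foldl extAccum none == some ('.' :: r)) := by
  rw [Bool.eq_iff_iff, PySem.Chars.endswith_iff, beq_iff_eq, suffix_iff ls r h, foldl_extAccum]
  by_cases hmem : '.' ∈ ls <;> simp [hmem]

-- ===== VERDICT (by name: the statement is the Claim_ definition above) =====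
theorem is_likely_filename_spec : Claim_equal_is_likely_filename := by
  intro name _
  unfold Spec_is_likely_filename is_likely_filename is_likely_filename_alt
  by_cases hne : name = ""
  · subst hne; decide
  · rw [if_neg hne]
    set ls := PySem.Chars.lower name.toList with hls
    have hlower : (PySem.Str.lower name).toList = ls := by simp [hls]
    simp only [extLoop, IMAGE_EXTENSIONS]
    simp only [PySem.Str.endswith_eq, hlower]
    rw [show (".png" : String).toList = '.' :: "png".toList from rfl,
        show (".jpg" : String).toList = '.' :: "jpg".toList from rfl,
        show (".jpeg" : String).toList = '.' :: "jpeg".toList from rfl,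
        show (".gif" : String).toList = '.' :: "gif".toList from rfl,
        show (".bmp" : String).toList = '.' :: "bmp".toList from rfl,
        show (".tiff" : String).toList = '.' :: "tiff".toList from rfl,
        show (".tif" : String).toList = '.' :: "tif".toList from rfl,
        show (".wmf" : String).toList = '.' :: "wmf".toList from rfl,
        show (".emf" : String).toList = '.' :: "emf".toList from rfl,
        show (".svg" : String).toList = '.' :: "svg".toList from rfl,
        show (".wdp" : String).toList = '.' :: "wdp".toList from rfl,
        ends_iff ls _ (by decide), ends_iff ls _ (by decide), ends_iff ls _ (by decide),
        ends_iff ls _ (by decide), ends_iff ls _ (by decide), ends_iff ls _ (by decide),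
        ends_iff ls _ (by decide), ends_iff ls _ (by decide), ends_iff ls _ (by decide),
        ends_iff ls _ (by decide), ends_iff ls _ (by decide)]
    cases hx : ls.foldl extAccum none with
    | none => simp
    | some e => simp [EXT_SET]
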